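-- pv_equiv track=rewrite | github.com/dmicloiu/weightedhotstuff | weighted_hotstuff.py | compute_quorum_weight
-- ===== SOURCE A (Python) =====
-- import heapq
--
-- def valid_quorum(subset_of_replicas, weights, quorumWeight):
--     sum = 0
--
--     for replicaID in subset_of_replicas:
--         sum += weights[replicaID]
--
--     return sum >= quorumWeight
--
-- def construct_valid_quorums(n, weights, quorum_weight):
--     valid_quorums = []
--
--     subsets = []
--     for i in range(n):
--         subsets.append([i])
--
--     while True:
--         new_subsets = []
--         okay = False
--         for subset in subsets:
--             last_added = subset[-1]
--
--             for i in range(last_added + 1, n):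
--                 new_subset = subset + [i]
--                 okay = True
--
--                 if valid_quorum(new_subset, weights, quorum_weight):
--                     valid_quorums.append(new_subset)
--                 else:
--                     new_subsets.append(new_subset)
--         if not okay:
--             break
--         subsets = new_subsets
--
--     return valid_quorums
--
-- def compute_quorum_weight(n, f, delta, weights):
--     heap = []
--     for replicaIdx in range(n):
--         # push -weight in heap to make it a MAX HEAP since we are interested in the replicas holding most of the power
--         heapq.heappush(heap, (-weights[replicaIdx], replicaIdx))
--
--     # get out the f maximum weights -> worst case scenario all most powerful replicas fail
--     for _ in range(f):
--         heapq.heappop(heap)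
--
--     # when f most powerful replicas fail the others still need to form quorum -> AVAILABILITY
--     quorum_weight = 0
--     while len(heap) > 0:
--         (weight, replicaIdx) = heapq.heappop(heap)
--         quorum_weight -= weight
--
--
--     # get all possible subsets which gather votes such that quorum is formed
--     # check that they overlap by at least (f + 1) nodes -> CONSISTENCY
--     valid_quorums = construct_valid_quorums(n, weights, quorum_weight)
--     for i in range(len(valid_quorums)):
--         quorum1 = valid_quorums[i]
--         for j in range(i + 1, len(valid_quorums)):
--             quorum2 = valid_quorums[j]
--
--             overlap = 0
--             for element in quorum1:
--                 if element in quorum2: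
--                     overlap += 1
--
--             if overlap < f + 1:
--                 # it means that the current weighting scheme is violating quorum system rules -> invalid weight scheme
--                 return -1
--
--     return quorum_weight
-- ===== SOURCE B (Python) =====
-- def compute_quorum_weight(n, f, delta, weights):
--     # quorum weight: drop the f largest of the first n weights, sum the rest
--     ws = sorted(weights[:max(n, 0)])
--     quorum_weight = sum(ws[:len(ws) - f])
--
--     # depth-first enumeration of minimal quorums, carrying the running total;
--     # a branch closes as soon as it reaches the quorum weight
--     def leaves(s, total):
--         found = []
--         for i in range(s[-1] + 1, n):
--             t = total + weights[i]
--             if t >= quorum_weight: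
--                 found.append(s + [i])
--             else:
--                 found.extend(leaves(s + [i], t))
--         return found
--
--     quorums = []
--     for i in range(n):
--         quorums.extend(leaves([i], weights[i]))
--
--     # consistency: every pair of quorums must share more than f replicas
--     for k in range(len(quorums)):
--         q1 = set(quorums[k])
--         if any(len(q1 & set(q2)) <= f for q2 in quorums[k + 1:]):
--             return -1
--     return quorum_weight
-- ===== Notes on version B (the rewrite author's own statement) =====
-- stated objective: alternative
-- what changed: Replaces the heapq max-heap by sort-and-slice for the quorum weight, replaces the breadth-first level-by-level subset enumeration (with per-candidate re-summing via valid_quorum) by a recursive depth-first search that carries the running total and closes each branch the moment it reaches the threshold, and replaces the element-counting overlap loop by set intersections; the DFS visits the same quorums in a different (lexicographic rather than level) order, which is immaterial because the pairwise-overlap check is order-invariant.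
import Mathlib
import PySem

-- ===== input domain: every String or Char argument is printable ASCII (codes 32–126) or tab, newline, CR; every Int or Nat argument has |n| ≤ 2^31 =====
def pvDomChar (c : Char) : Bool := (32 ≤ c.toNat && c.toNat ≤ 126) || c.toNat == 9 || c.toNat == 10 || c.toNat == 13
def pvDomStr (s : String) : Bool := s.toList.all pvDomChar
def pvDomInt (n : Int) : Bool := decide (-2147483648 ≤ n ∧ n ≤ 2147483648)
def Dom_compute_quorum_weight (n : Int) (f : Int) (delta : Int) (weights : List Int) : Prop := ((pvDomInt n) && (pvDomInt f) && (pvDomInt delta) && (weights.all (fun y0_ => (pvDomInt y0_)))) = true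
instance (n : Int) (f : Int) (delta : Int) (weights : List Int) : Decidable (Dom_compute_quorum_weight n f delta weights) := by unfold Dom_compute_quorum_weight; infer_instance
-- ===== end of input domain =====

-- B replaces the heap by sort-and-slice, the breadth-first level enumeration by a recursive
-- depth-first search carrying running totals, and the overlap-counting loop by set
-- intersections (objective: alternative; the quorum lists come out in a different order,
-- which the order-invariant pairwise check cannot observe).

-- ===== PORT A =====
-- Python tuple `<` on (Int, Int) pairs (lexicographic), as heapq compares them.
def pvLt (a b : Int × Int) : Bool :=
  decide (a.1 < b.1) || (decide (a.1 = b.1) && decide (a.2 < b.2))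

-- heapq._siftdown(heap, startpos, pos) body loop; positions are the (always nonnegative)
-- Python ints, kept as Nat; in-range accesses are exact via getD (Python never reads out of range here).
theorem pvSdDec (startpos pos : Nat) (_h : startpos < pos) : (pos - 1) / 2 < pos := by omega

def pvSiftdownLoop (heap : List (Int × Int)) (startpos pos : Nat) (newitem : Int × Int) :
    List (Int × Int) × Nat :=
  if _h : startpos < pos then
    let parentpos := (pos - 1) / 2
    let parent := heap.getD parentpos (0, 0)
    if pvLt newitem parent then
      pvSiftdownLoop (heap.set pos parent) startpos parentpos newitem
    else (heap, pos)
  else (heap, pos)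
termination_by pos
decreasing_by exact pvSdDec startpos pos _h

def pvSiftdown (heap : List (Int × Int)) (startpos pos : Nat) : List (Int × Int) :=
  let newitem := heap.getD pos (0, 0)
  let r := pvSiftdownLoop heap startpos pos newitem
  r.1.set r.2 newitem

def pvHeappush (heap : List (Int × Int)) (item : Int × Int) : List (Int × Int) :=
  pvSiftdown (heap ++ [item]) 0 heap.length

theorem pvSuDec (heap : List (Int × Int)) (pos endpos : Nat) (_h : 2 * pos + 1 < endpos) :
    endpos - (if (2 * pos + 1 + 1 < endpos &&
        !(pvLt (heap.getD (2 * pos + 1) (0, 0)) (heap.getD (2 * pos + 1 + 1) (0, 0)))) = true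
      then 2 * pos + 1 + 1 else 2 * pos + 1) < endpos - pos := by
  split <;> omega

-- heapq._siftup(heap, pos) body loop (sift the hole to a leaf, choosing the smaller child).
def pvSiftupLoop (heap : List (Int × Int)) (pos endpos : Nat) : List (Int × Int) × Nat :=
  if _h : 2 * pos + 1 < endpos then
    let childpos := 2 * pos + 1
    let rightpos := childpos + 1
    let childpos2 :=
      if rightpos < endpos &&
          !(pvLt (heap.getD childpos (0, 0)) (heap.getD rightpos (0, 0))) then rightpos
      else childpos
    pvSiftupLoop (heap.set pos (heap.getD childpos2 (0, 0))) childpos2 endpos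
  else (heap, pos)
termination_by endpos - pos
decreasing_by exact pvSuDec heap pos endpos _h

def pvSiftup (heap : List (Int × Int)) (pos : Nat) : List (Int × Int) :=
  let endpos := heap.length
  let newitem := heap.getD pos (0, 0)
  let r := pvSiftupLoop heap pos endpos
  pvSiftdown (r.1.set r.2 newitem) pos r.2

-- heapq.heappop; Pre_ keeps every call on a nonempty heap (empty pop raises IndexError in Python).
def pvHeappop (heap : List (Int × Int)) : (Int × Int) × List (Int × Int) :=
  let lastelt := heap.getD (heap.length - 1) (0, 0)
  let rest := heap.dropLast
  if rest.isEmpty then (lastelt, rest)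
  else
    let returnitem := rest.getD 0 (0, 0)
    (returnitem, pvSiftup (rest.set 0 lastelt) 0)

-- length lemmas cited by pvDrain's termination proof
theorem pvSiftdownLoop_len (heap : List (Int × Int)) (startpos pos : Nat) (x : Int × Int) :
    ((pvSiftdownLoop heap startpos pos x).1).length = heap.length := by
  fun_induction pvSiftdownLoop heap startpos pos x <;> simp_all

theorem pvSiftdown_len (heap : List (Int × Int)) (s p : Nat) :
    (pvSiftdown heap s p).length = heap.length := by
  simp [pvSiftdown, pvSiftdownLoop_len]

theorem pvSiftupLoop_len (heap : List (Int × Int)) (pos endpos : Nat) :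
    ((pvSiftupLoop heap pos endpos).1).length = heap.length := by
  fun_induction pvSiftupLoop heap pos endpos <;> simp_all

theorem pvSiftup_len (heap : List (Int × Int)) (pos : Nat) :
    (pvSiftup heap pos).length = heap.length := by
  simp [pvSiftup, pvSiftdown_len, pvSiftupLoop_len]

theorem pvHeappop_len (heap : List (Int × Int)) (h : heap ≠ []) :
    ((pvHeappop heap).2).length + 1 = heap.length := by
  by_cases he : heap.dropLast.isEmpty <;>
    simp [pvHeappop, he, pvSiftup_len] <;>
    · have h1 : heap.dropLast.length = heap.length - 1 := List.length_dropLast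
      have h2 : heap.length ≠ 0 := by simpa using List.length_pos_of_ne_nil h |>.ne'
      omega

theorem pvDrainDec (heap : List (Int × Int)) (_h : ¬heap.isEmpty = true) :
    ((pvHeappop heap).2).length < heap.length := by
  have := pvHeappop_len heap (by simpa using _h)
  omega

-- the `while len(heap) > 0` drain loop accumulating quorum_weight -= weight
def pvDrain (heap : List (Int × Int)) (qw : Int) : Int :=
  if _h : heap.isEmpty then qw
  else
    let r := pvHeappop heap
    pvDrain r.2 (qw - r.1.1)
termination_by heap.length
decreasing_by exact pvDrainDec heap _h

-- valid_quorum(subset_of_replicas, weights, quorumWeight)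
def pvValidQuorum (subset : List Int) (weights : List Int) (quorumWeight : Int) : Bool :=
  decide (subset.foldl (fun s replicaID => s + PySem.List.pyGetD weights replicaID 0) 0 ≥ quorumWeight)

-- one pass of the `while True` body of construct_valid_quorums: state (valid_quorums, new_subsets, okay)
def pvCvqIter (n : Int) (weights : List Int) (qw : Int)
    (valid : List (List Int)) (subsets : List (List Int)) :
    List (List Int) × List (List Int) × Bool :=
  subsets.foldl (fun acc subset =>
    let last_added := PySem.List.pyGetD subset (-1) 0
    (PySem.List.pyRange (last_added + 1) n 1).foldl (fun acc2 i =>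
      let new_subset := subset ++ [i]
      if pvValidQuorum new_subset weights qw then
        (acc2.1 ++ [new_subset], acc2.2.1, true)
      else
        (acc2.1, acc2.2.1 ++ [new_subset], true)) acc)
    (valid, [], false)

-- termination machinery for both enumeration loops ------------------------------------
def pvVal (n : Int) (s : List Int) : Nat := (n - PySem.List.pyGetD s (-1) 0).toNat + 1

def pvLevelMeasure (n : Int) (subsets : List (List Int)) : Nat :=
  (subsets.map (pvVal n)).foldr max 0

def pvExt (n : Int) (subsets : List (List Int)) : List (List Int) :=
  subsets.flatMap (fun s =>
    (PySem.List.pyRange (PySem.List.pyGetD s (-1) 0 + 1) n 1).map (fun i => s ++ [i]))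

theorem pvLast_append (s : List Int) (i : Int) :
    PySem.List.pyGetD (s ++ [i]) (-1) 0 = i := by
  simp [PySem.List.pyGetD, PySem.List.pyGet?, PySem.List.pyIdx?]

theorem pvMem_le_foldr_max {a : Nat} {l : List Nat} (h : a ∈ l) : a ≤ l.foldr max 0 := by
  induction l with
  | nil => simp at h
  | cons x xs ih =>
    rcases List.mem_cons.1 h with rfl | h'
    · exact Nat.le_max_left _ _
    · exact le_trans (ih h') (Nat.le_max_right _ _)

theorem pvFoldr_max_lt {M : Nat} {l : List Nat} (h0 : 0 < M) (h : ∀ a ∈ l, a < M) :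
    l.foldr max 0 < M := by
  induction l with
  | nil => simpa
  | cons x xs ih => simp only [List.foldr_cons] ; exact max_lt (h x (by simp)) (ih fun a ha => h a (by simp [ha]))

theorem pvExt_val {n : Int} {subsets : List (List Int)} {t : List Int} (h : t ∈ pvExt n subsets) :
    ∃ s ∈ subsets, pvVal n t < pvVal n s := by
  rcases List.mem_flatMap.1 h with ⟨s, hs, ht⟩
  rcases List.mem_map.1 ht with ⟨i, hi, rfl⟩
  refine ⟨s, hs, ?_⟩
  have := (PySem.List.mem_pyRange_one).1 hi
  simp only [pvVal, pvLast_append]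
  omega

theorem pvMeasure_lt_of_sub (n : Int) (subsets l' : List (List Int))
    (h0 : 0 < pvLevelMeasure n subsets)
    (hsub : ∀ t ∈ l', ∃ s ∈ subsets, pvVal n t < pvVal n s) :
    pvLevelMeasure n l' < pvLevelMeasure n subsets := by
  apply pvFoldr_max_lt h0
  intro a ha
  rcases List.mem_map.1 ha with ⟨t, ht, rfl⟩
  rcases hsub t ht with ⟨s, hs, hlt⟩
  exact lt_of_lt_of_le hlt (pvMem_le_foldr_max (List.mem_map_of_mem hs))

-- characterization of one iteration (also used by the equivalence proof below)
theorem pvInnerFold (weights : List Int) (qw : Int) (s : List Int) (l : List Int)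
    (acc : List (List Int) × List (List Int) × Bool) :
    (l.foldl (fun acc2 i =>
      if pvValidQuorum (s ++ [i]) weights qw then (acc2.1 ++ [s ++ [i]], acc2.2.1, true)
      else (acc2.1, acc2.2.1 ++ [s ++ [i]], true)) acc)
    = (acc.1 ++ ((l.map (fun i => s ++ [i])).filter (fun t => pvValidQuorum t weights qw)),
       acc.2.1 ++ ((l.map (fun i => s ++ [i])).filter (fun t => !pvValidQuorum t weights qw)),
       (acc.2.2 || !l.isEmpty)) := by
  induction l generalizing acc with
  | nil => simp
  | cons x xs ih =>
    by_cases h : pvValidQuorum (s ++ [x]) weights qw <;>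
      simp [List.foldl_cons, h, ih]

theorem pvRange_isEmpty (a b : Int) :
    (PySem.List.pyRange a b 1).isEmpty = !decide (a < b) := by
  by_cases h : a < b
  · rw [PySem.List.pyRange_one_cons h] ; simp [h]
  · rw [PySem.List.pyRange_one_eq_nil (by omega)] ; simp [h]

theorem pvCvqIter_eq (n : Int) (weights : List Int) (qw : Int)
    (valid : List (List Int)) (subsets : List (List Int)) :
    pvCvqIter n weights qw valid subsets
    = (valid ++ ((pvExt n subsets).filter (fun t => pvValidQuorum t weights qw)),
       ((pvExt n subsets).filter (fun t => !pvValidQuorum t weights qw)),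
       subsets.any (fun s => decide (PySem.List.pyGetD s (-1) 0 + 1 < n))) := by
  suffices h : ∀ (acc : List (List Int) × List (List Int) × Bool),
      subsets.foldl (fun acc subset =>
        (PySem.List.pyRange (PySem.List.pyGetD subset (-1) 0 + 1) n 1).foldl (fun acc2 i =>
          if pvValidQuorum (subset ++ [i]) weights qw then
            (acc2.1 ++ [subset ++ [i]], acc2.2.1, true)
          else
            (acc2.1, acc2.2.1 ++ [subset ++ [i]], true)) acc) acc
      = (acc.1 ++ ((pvExt n subsets).filter (fun t => pvValidQuorum t weights qw)),
         acc.2.1 ++ ((pvExt n subsets).filter (fun t => !pvValidQuorum t weights qw)),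
         (acc.2.2 || subsets.any (fun s => decide (PySem.List.pyGetD s (-1) 0 + 1 < n)))) by
    simpa [pvCvqIter] using h (valid, [], false)
  induction subsets with
  | nil => intro acc; simp [pvExt]
  | cons s ss ih =>
    intro acc
    rw [List.foldl_cons, pvInnerFold weights qw s _ acc, ih]
    simp [pvExt, pvRange_isEmpty, List.filter_append, Bool.or_assoc]

theorem pvCvqDec (n : Int) (weights : List Int) (qw : Int)
    (valid : List (List Int)) (subsets : List (List Int))
    (hok : (pvCvqIter n weights qw valid subsets).2.2 = true) :
    pvLevelMeasure n (pvCvqIter n weights qw valid subsets).2.1 < pvLevelMeasure n subsets := by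
  rw [pvCvqIter_eq] at hok
  simp only [pvCvqIter_eq]
  rcases List.any_eq_true.1 hok with ⟨s, hs, hq⟩
  have hq' : PySem.List.pyGetD s (-1) 0 + 1 < n := by simpa using hq
  have hval : 3 ≤ pvVal n s := by simp only [pvVal]; omega
  have h0 : 0 < pvLevelMeasure n subsets :=
    lt_of_lt_of_le (by omega) (le_trans hval (pvMem_le_foldr_max (List.mem_map_of_mem hs)))
  exact pvMeasure_lt_of_sub n subsets _ h0 (fun t ht => pvExt_val (List.mem_of_mem_filter ht))

-- the `while True` loop of construct_valid_quorums
def pvCvqLoop (n : Int) (weights : List Int) (qw : Int)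
    (valid : List (List Int)) (subsets : List (List Int)) : List (List Int) :=
  let r := pvCvqIter n weights qw valid subsets
  if r.2.2 then pvCvqLoop n weights qw r.1 r.2.1 else r.1
termination_by pvLevelMeasure n subsets
decreasing_by
  rename_i hok
  exact pvCvqDec n weights qw valid subsets hok

def compute_quorum_weight (n : Int) (f : Int) (delta : Int) (weights : List Int) : Int :=
  let heap := (PySem.List.pyRange 0 n 1).foldl
    (fun h replicaIdx => pvHeappush h (-(PySem.List.pyGetD weights replicaIdx 0), replicaIdx)) []
  let heap2 := (PySem.List.pyRange 0 f 1).foldl (fun h _ => (pvHeappop h).2) heap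
  let quorum_weight := pvDrain heap2 0
  let valid_quorums := pvCvqLoop n weights quorum_weight []
    ((PySem.List.pyRange 0 n 1).foldl (fun acc i => acc ++ [[i]]) [])
  -- the early `return -1` of the pairwise check ported as `any`
  if (PySem.List.pyRange 0 (valid_quorums.length : Int) 1).any (fun i =>
      let quorum1 := PySem.List.pyGetD valid_quorums i []
      (PySem.List.pyRange (i + 1) (valid_quorums.length : Int) 1).any (fun j =>
        let quorum2 := PySem.List.pyGetD valid_quorums j []
        let overlap : Int := quorum1.foldl
          (fun ov element => if quorum2.contains element then ov + 1 else ov) 0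
        decide (overlap < f + 1)))
  then -1 else quorum_weight

-- ===== PORT B =====
-- `leaves(s, total)`: depth-first recursion; the loop body's append/extend is the flatMap
-- over the range (attach only carries the range membership for the termination proof).
def pvDfs (n : Int) (qw : Int) (w : List Int) (s : List Int) (t : Int) : List (List Int) :=
  (PySem.List.pyRange (PySem.List.pyGetD s (-1) 0 + 1) n 1).attach.flatMap
    (fun i =>
      if t + PySem.List.pyGetD w i.1 0 ≥ qw then [s ++ [i.1]]
      else pvDfs n qw w (s ++ [i.1]) (t + PySem.List.pyGetD w i.1 0))
termination_by pvVal n s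
decreasing_by
  have h := PySem.List.mem_pyRange_one.1 i.2
  simp only [pvVal, pvLast_append]
  omega

def compute_quorum_weight_alt (n : Int) (f : Int) (delta : Int) (weights : List Int) : Int :=
  let ws := PySem.List.sorted (PySem.List.slice weights none (some (max n 0))) (fun x => x) false
  let quorum_weight := (PySem.List.slice ws none (some ((ws.length : Int) - f))).sum
  let quorums := (PySem.List.pyRange 0 n 1).foldl
    (fun acc i => acc ++ pvDfs n quorum_weight weights [i] (PySem.List.pyGetD weights i 0)) []
  if (PySem.List.pyRange 0 (quorums.length : Int) 1).any (fun i =>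
      let s1 : PySem.Set Int := PySem.Set.ofList (PySem.List.pyGetD quorums i [])
      (PySem.List.slice quorums (some (i + 1)) none).any (fun q2 =>
        decide (((PySem.Set.inter s1 (PySem.Set.ofList q2)).length : Int) ≤ f)))
  then -1 else quorum_weight

-- ===== PRECONDITION & SPEC =====
-- Pre_ excludes exactly the inputs on which A raises IndexError: n beyond len(weights)
-- (heap build indexes weights[0..n-1]) or f greater than the heap size (pop from empty heap).
def Pre_compute_quorum_weight (n : Int) (f : Int) (delta : Int) (weights : List Int) : Prop :=
  max n 0 ≤ (weights.length : Int) ∧ f ≤ max n 0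
instance (n : Int) (f : Int) (delta : Int) (weights : List Int) :
    Decidable (Pre_compute_quorum_weight n f delta weights) := by
  unfold Pre_compute_quorum_weight; infer_instance

def pvWitness_compute_quorum_weight : Int × Int × Int × List Int := (3, 1, 0, [1, 2, 3])

def Spec_compute_quorum_weight (n : Int) (f : Int) (delta : Int) (weights : List Int) (out : Int) : Prop := out = compute_quorum_weight_alt n f delta weights
instance (n : Int) (f : Int) (delta : Int) (weights : List Int) (out : Int) : Decidable (Spec_compute_quorum_weight n f delta weights out) := by unfold Spec_compute_quorum_weight; infer_instance

-- ===== CLAIM (what is proved, stated in full; the proofs are below) =====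
def Claim_equal_compute_quorum_weight : Prop := ∀ (n : Int) (f : Int) (delta : Int) (weights : List Int), Dom_compute_quorum_weight n f delta weights → Pre_compute_quorum_weight n f delta weights → Spec_compute_quorum_weight n f delta weights (compute_quorum_weight n f delta weights)

-- ===== LEMMAS AND PROOFS =====

-- ---- lexicographic order facts ----
def pvPle (a b : Int × Int) : Prop := a.1 < b.1 ∨ (a.1 = b.1 ∧ a.2 ≤ b.2)

theorem pvPle_refl (a : Int × Int) : pvPle a a := Or.inr ⟨rfl, le_refl _⟩

theorem pvPle_trans {a b c : Int × Int} (h1 : pvPle a b) (h2 : pvPle b c) : pvPle a c := by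
  rcases h1 with h1 | ⟨h1, h1'⟩ <;> rcases h2 with h2 | ⟨h2, h2'⟩ <;>
    simp [pvPle] <;> omega

theorem pvPle_of_lt {a b : Int × Int} (h : pvLt a b = true) : pvPle a b := by
  simp [pvLt] at h; rcases h with h | h <;> simp [pvPle] <;> omega

theorem pvPle_of_not_lt {a b : Int × Int} (h : pvLt a b = false) : pvPle b a := by
  simp [pvLt] at h; simp [pvPle]; omega

-- ---- binary-heap shape ----
def pvChild (i j : Nat) : Prop := j = 2 * i + 1 ∨ j = 2 * i + 2

def pvIsHeap (h : List (Int × Int)) : Prop :=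
  ∀ i j, pvChild i j → j < h.length → pvPle (h.getD i (0, 0)) (h.getD j (0, 0))

theorem pvGetD_set_self {α : Type} (l : List α) (p : Nat) (v d : α) (hp : p < l.length) :
    (l.set p v).getD p d = v := by
  rw [List.getD_eq_getElem _ _ (by simpa using hp)]
  simp

theorem pvGetD_set_ne {α : Type} (l : List α) (p q : Nat) (v d : α) (hpq : q ≠ p) :
    (l.set p v).getD q d = l.getD q d := by
  by_cases hq : q < l.length
  · rw [List.getD_eq_getElem _ _ (by simpa using hq), List.getD_eq_getElem _ _ hq]
    exact List.getElem_set_ne (by omega) _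
  · rw [List.getD_eq_default _ _ (by simpa using hq), List.getD_eq_default _ _ (by omega)]

theorem pvGetD_append {α : Type} (l t : List α) (k : Nat) (d : α) (hk : k < l.length) :
    (l ++ t).getD k d = l.getD k d := by
  rw [List.getD_eq_getElem _ _ (by simp; omega), List.getD_eq_getElem _ _ hk]
  exact List.getElem_append_left hk

theorem pvTwoLeCount (l : List (Int × Int)) (i j : Nat) (y : Int × Int)
    (hij : i < j) (hj : j < l.length)
    (h1 : l[i]'(by omega) = y) (h2 : l[j] = y) : 2 ≤ l.count y := by
  conv_rhs => rw [← List.take_append_drop j l]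
  rw [List.count_append]
  have m1 : y ∈ l.take j := by
    rw [← h1]
    have e : (l.take j)[i]'(by simp; omega) = l[i]'(by omega) := List.getElem_take
    exact e ▸ List.getElem_mem _
  have m2 : y ∈ l.drop j := by
    rw [← h2]
    have e : (l.drop j)[0]'(by simp; omega) = l[j + 0]'(by omega) := List.getElem_drop
    simp only [Nat.add_zero] at e
    exact e ▸ List.getElem_mem _
  have := List.count_pos_iff.2 m1
  have := List.count_pos_iff.2 m2
  omega

theorem pvSwapPerm (l : List (Int × Int)) (i j : Nat) (v : Int × Int)
    (hi : i < l.length) (hj : j < l.length) (hij : i ≠ j) :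
    ((l.set i (l.getD j (0, 0))).set j v).Perm (l.set i v) := by
  rw [List.perm_iff_count]
  intro y
  have hj' : j < (l.set i (l.getD j (0, 0))).length := by simpa using hj
  rw [List.count_set hj', List.count_set hi, List.count_set hi]
  have e1 : (l.set i (l.getD j (0, 0)))[j] = l[j] := List.getElem_set_ne (by omega) _
  have e2 : l.getD j (0, 0) = l[j] := List.getD_eq_getElem _ _ hj
  rw [e1, e2]
  have c1 : l[i] = y → 1 ≤ l.count y := fun h => List.count_pos_iff.2 (h ▸ List.getElem_mem hi)
  have c2 : l[j] = y → 1 ≤ l.count y := fun h => List.count_pos_iff.2 (h ▸ List.getElem_mem hj)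
  have c3 : l[i] = y → l[j] = y → 2 ≤ l.count y := by
    intro h1 h2
    rcases Nat.lt_or_ge i j with hlt | hge
    · exact pvTwoLeCount l i j y hlt hj h1 h2
    · exact pvTwoLeCount l j i y (by omega) hi h2 h1
  by_cases b1 : l[i] = y <;> by_cases b2 : l[j] = y <;>
    simp [b1, b2] <;> omega

theorem pvHeapSet (g : List (Int × Int)) (pos : Nat) (new : Int × Int)
    (hpos : pos < g.length)
    (ha : ∀ i j, pvChild i j → j < g.length → j ≠ pos → pvPle (g.getD i (0, 0)) (g.getD j (0, 0)))
    (hb : ∀ j, pvChild pos j → j < g.length → pvPle new (g.getD j (0, 0)))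
    (hp : pos ≠ 0 → pvPle (g.getD ((pos - 1) / 2) (0, 0)) new) :
    pvIsHeap (g.set pos new) := by
  intro i j hc hj
  rw [List.length_set] at hj
  have hij : i < j := by rcases hc with rfl | rfl <;> omega
  by_cases hjp : j = pos
  · subst hjp
    have hi : i = (j - 1) / 2 := by rcases hc with rfl | rfl <;> omega
    rw [pvGetD_set_ne _ _ _ _ _ (by omega), pvGetD_set_self _ _ _ _ hpos, hi]
    exact hp (by omega)
  · by_cases hip : i = pos
    · subst hip
      rw [pvGetD_set_self _ _ _ _ hpos, pvGetD_set_ne _ _ _ _ _ (by omega)]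
      exact hb j hc hj
    · rw [pvGetD_set_ne _ _ _ _ _ (by omega), pvGetD_set_ne _ _ _ _ _ (by omega)]
      exact ha i j hc hj hjp

theorem pvRoot_min (h : List (Int × Int)) (hh : pvIsHeap h) :
    ∀ j, j < h.length → pvPle (h.getD 0 (0, 0)) (h.getD j (0, 0)) := by
  intro j
  induction j using Nat.strong_induction_on with
  | _ j ih =>
    intro hj
    rcases Nat.eq_zero_or_pos j with rfl | hj0
    · exact pvPle_refl _
    · have hc : pvChild ((j - 1) / 2) j := by unfold pvChild; omega
      exact pvPle_trans (ih ((j - 1) / 2) (by omega) (by omega)) (hh _ _ hc hj)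

-- ---- heapq._siftdown correctness ----
theorem pvSiftdownLoop_ok :
    ∀ (pos : Nat) (g : List (Int × Int)) (new : Int × Int),
      pos < g.length →
      (∀ i j, pvChild i j → j < g.length → j ≠ pos → pvPle (g.getD i (0, 0)) (g.getD j (0, 0))) →
      (∀ j, pvChild pos j → j < g.length → pvPle new (g.getD j (0, 0))) →
      (pos ≠ 0 → ∀ j, pvChild pos j → j < g.length →
        pvPle (g.getD ((pos - 1) / 2) (0, 0)) (g.getD j (0, 0))) →
      (pvSiftdownLoop g 0 pos new).2 < g.length ∧
      pvIsHeap (((pvSiftdownLoop g 0 pos new).1).set (pvSiftdownLoop g 0 pos new).2 new) ∧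
      ((((pvSiftdownLoop g 0 pos new).1).set (pvSiftdownLoop g 0 pos new).2 new)).Perm
        (g.set pos new) := by
  intro pos
  induction pos using Nat.strong_induction_on with
  | _ pos ih =>
    intro g new hpos ha hb hc
    rw [pvSiftdownLoop]
    by_cases h0 : 0 < pos
    · rw [dif_pos h0]
      simp only
      by_cases hlt : pvLt new (g.getD ((pos - 1) / 2) (0, 0)) = true
      · rw [if_pos hlt]
        have hpp : (pos - 1) / 2 < pos := by omega
        have hlen : ((g.set pos (g.getD ((pos - 1) / 2) (0, 0)))).length = g.length := by simp
        obtain ⟨r1, r2, r3⟩ := ih ((pos - 1) / 2) hpp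
          (g.set pos (g.getD ((pos - 1) / 2) (0, 0))) new
          (by simp only [List.length_set]; omega)
          (by
            intro i j hcij hj hjne
            rw [hlen] at hj
            by_cases hjpos : j = pos
            · subst hjpos
              have hi : i = (j - 1) / 2 := by rcases hcij with rfl | rfl <;> omega
              rw [hi, pvGetD_set_ne _ _ _ _ _ (by omega), pvGetD_set_self _ _ _ _ hpos]
              exact pvPle_refl _
            · by_cases hipos : i = pos
              · subst hipos
                rw [pvGetD_set_self _ _ _ _ hpos, pvGetD_set_ne _ _ _ _ _ (by omega)]
                exact hc (by omega) j hcij hj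
              · rw [pvGetD_set_ne _ _ _ _ _ (by omega), pvGetD_set_ne _ _ _ _ _ (by omega)]
                exact ha i j hcij hj hjpos)
          (by
            intro j hcj hj
            rw [hlen] at hj
            by_cases hjpos : j = pos
            · subst hjpos
              rw [pvGetD_set_self _ _ _ _ hpos]
              exact pvPle_of_lt hlt
            · rw [pvGetD_set_ne _ _ _ _ _ (by omega)]
              exact pvPle_trans (pvPle_of_lt hlt) (ha _ j hcj hj hjpos))
          (by
            intro hpp0 j hcj hj
            rw [hlen] at hj
            have hpar : pvChild (((pos - 1) / 2 - 1) / 2) ((pos - 1) / 2) := by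
              unfold pvChild; omega
            have hppne : ((pos - 1) / 2 - 1) / 2 ≠ pos := by omega
            by_cases hjpos : j = pos
            · subst hjpos
              rw [pvGetD_set_ne _ _ _ _ _ (by omega), pvGetD_set_self _ _ _ _ hpos]
              exact ha _ _ hpar (by omega) (by omega)
            · rw [pvGetD_set_ne _ _ _ _ _ (by omega), pvGetD_set_ne _ _ _ _ _ (by omega)]
              exact pvPle_trans (ha _ _ hpar (by omega) (by omega)) (ha _ j hcj hj hjpos))
        rw [hlen] at r1
        refine ⟨r1, r2, r3.trans ?_⟩
        exact pvSwapPerm g pos ((pos - 1) / 2) new hpos (by omega) (by omega)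
      · rw [if_neg hlt]
        refine ⟨hpos, ?_, List.Perm.refl _⟩
        exact pvHeapSet g pos new hpos ha hb (fun _ => pvPle_of_not_lt (by simpa using hlt))
    · have hp0 : pos = 0 := by omega
      subst hp0
      rw [dif_neg (by omega)]
      refine ⟨hpos, ?_, List.Perm.refl _⟩
      exact pvHeapSet g 0 new hpos ha hb (by omega)

theorem pvSiftdown_ok (g : List (Int × Int)) (pos : Nat)
    (hpos : pos < g.length) (hleaf : g.length ≤ 2 * pos + 1)
    (ha : ∀ i j, pvChild i j → j < g.length → j ≠ pos →
      pvPle (g.getD i (0, 0)) (g.getD j (0, 0))) :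
    pvIsHeap (pvSiftdown g 0 pos) ∧ (pvSiftdown g 0 pos).Perm g := by
  obtain ⟨r1, r2, r3⟩ := pvSiftdownLoop_ok pos g (g.getD pos (0, 0)) hpos ha
    (by intro j hcj hj; rcases hcj with rfl | rfl <;> omega)
    (by intro _ j hcj hj; rcases hcj with rfl | rfl <;> omega)
  refine ⟨r2, r3.trans ?_⟩
  rw [List.getD_eq_getElem _ _ hpos, List.set_getElem_self]

-- ---- heapq._siftup correctness ----
def pvSiftupInv (k : Nat) : Prop :=
  ∀ (pos : Nat) (g : List (Int × Int)) (e : Nat),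
    e = g.length →
    g.length - pos ≤ k →
    pos < g.length →
    (∀ i j, pvChild i j → j < g.length → i ≠ pos → pvPle (g.getD i (0, 0)) (g.getD j (0, 0))) →
    (pos ≠ 0 → ∀ j, pvChild pos j → j < g.length →
      pvPle (g.getD ((pos - 1) / 2) (0, 0)) (g.getD j (0, 0))) →
    (pvSiftupLoop g pos e).2 < g.length ∧
    g.length ≤ 2 * (pvSiftupLoop g pos e).2 + 1 ∧
    ((pvSiftupLoop g pos e).1).length = g.length ∧
    (∀ i j, pvChild i j → j < g.length → i ≠ (pvSiftupLoop g pos e).2 →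
      pvPle (((pvSiftupLoop g pos e).1).getD i (0, 0)) (((pvSiftupLoop g pos e).1).getD j (0, 0))) ∧
    (∀ new, (((pvSiftupLoop g pos e).1).set (pvSiftupLoop g pos e).2 new).Perm (g.set pos new))

theorem pvSiftupStep (k : Nat) (ih : pvSiftupInv k)
    (pos : Nat) (g : List (Int × Int)) (e : Nat) (cp : Nat)
    (he : e = g.length) (hk : g.length - pos ≤ k + 1) (hpos : pos < g.length)
    (ha : ∀ i j, pvChild i j → j < g.length → i ≠ pos → pvPle (g.getD i (0, 0)) (g.getD j (0, 0)))
    (hb : pos ≠ 0 → ∀ j, pvChild pos j → j < g.length →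
      pvPle (g.getD ((pos - 1) / 2) (0, 0)) (g.getD j (0, 0)))
    (hcp : pvChild pos cp) (hcpl : cp < g.length)
    (hsel : ∀ j, pvChild pos j → j < g.length → pvPle (g.getD cp (0, 0)) (g.getD j (0, 0))) :
    (pvSiftupLoop (g.set pos (g.getD cp (0, 0))) cp e).2 < g.length ∧
    g.length ≤ 2 * (pvSiftupLoop (g.set pos (g.getD cp (0, 0))) cp e).2 + 1 ∧
    ((pvSiftupLoop (g.set pos (g.getD cp (0, 0))) cp e).1).length = g.length ∧
    (∀ i j, pvChild i j → j < g.length → i ≠ (pvSiftupLoop (g.set pos (g.getD cp (0, 0))) cp e).2 →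
      pvPle (((pvSiftupLoop (g.set pos (g.getD cp (0, 0))) cp e).1).getD i (0, 0))
        (((pvSiftupLoop (g.set pos (g.getD cp (0, 0))) cp e).1).getD j (0, 0))) ∧
    (∀ new, (((pvSiftupLoop (g.set pos (g.getD cp (0, 0))) cp e).1).set
        (pvSiftupLoop (g.set pos (g.getD cp (0, 0))) cp e).2 new).Perm (g.set pos new)) := by
  have hpcp : pos < cp := by rcases hcp with rfl | rfl <;> omega
  have hlen : ((g.set pos (g.getD cp (0, 0)))).length = g.length := by simp
  obtain ⟨r1, r2, r3, r4, r5⟩ := ih cp (g.set pos (g.getD cp (0, 0))) e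
    (by rw [hlen, he])
    (by simp only [List.length_set]; omega)
    (by simp only [List.length_set]; omega)
    (by
      intro i j hcij hj hine
      rw [hlen] at hj
      by_cases hipos : i = pos
      · subst hipos
        rw [pvGetD_set_self _ _ _ _ hpos]
        by_cases hjcp : j = cp
        · subst hjcp
          rw [pvGetD_set_ne _ _ _ _ _ (by omega)]
          exact pvPle_refl _
        · rw [pvGetD_set_ne _ _ _ _ _ (by rcases hcij with rfl | rfl <;> omega)]
          exact hsel j hcij hj
      · by_cases hjpos : j = pos
        · subst hjpos
          have hi : i = (j - 1) / 2 := by rcases hcij with rfl | rfl <;> omega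
          have hj0 : j ≠ 0 := by rcases hcij with rfl | rfl <;> omega
          rw [pvGetD_set_ne _ _ _ _ _ (by omega), pvGetD_set_self _ _ _ _ hpos, hi]
          exact hb hj0 cp hcp hcpl
        · rw [pvGetD_set_ne _ _ _ _ _ (by omega), pvGetD_set_ne _ _ _ _ _ (by omega)]
          exact ha i j hcij hj hipos)
    (by
      intro _ j hcj hj
      rw [hlen] at hj
      have hcppar : (cp - 1) / 2 = pos := by rcases hcp with rfl | rfl <;> omega
      have hjcp : cp < j := by rcases hcj with rfl | rfl <;> omega
      rw [hcppar, pvGetD_set_self _ _ _ _ hpos, pvGetD_set_ne _ _ _ _ _ (by omega)]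
      exact ha cp j hcj hj (by omega))
  rw [hlen] at r1 r2 r3
  refine ⟨r1, r2, r3, ?_, ?_⟩
  · intro i j hcij hj hine
    exact r4 i j hcij (by omega) hine
  · intro new
    exact (r5 new).trans (pvSwapPerm g pos cp new hpos hcpl (by omega))

theorem pvSiftupLoop_ok : ∀ (k : Nat), pvSiftupInv k := by
  intro k
  induction k with
  | zero => intro pos g e he hk hpos ha hb; omega
  | succ k ih =>
    intro pos g e he hk hpos ha hb
    rw [pvSiftupLoop]
    by_cases hch : 2 * pos + 1 < e
    · rw [dif_pos hch]
      simp only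
      by_cases hsw : (2 * pos + 1 + 1 < e &&
          !pvLt (g.getD (2 * pos + 1) (0, 0)) (g.getD (2 * pos + 1 + 1) (0, 0))) = true
      · rw [if_pos hsw]
        simp only [Bool.and_eq_true, Bool.not_eq_eq_eq_not, Bool.not_true,
          decide_eq_true_eq] at hsw
        exact pvSiftupStep k ih pos g e (2 * pos + 1 + 1) he hk hpos ha hb
          (by unfold pvChild; omega) (by omega)
          (by
            intro j hcj hj
            rcases hcj with rfl | rfl
            · exact pvPle_of_not_lt hsw.2
            · exact pvPle_refl _)
      · rw [if_neg hsw]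
        simp only [Bool.and_eq_true, Bool.not_eq_eq_eq_not, Bool.not_true,
          decide_eq_true_eq, not_and] at hsw
        exact pvSiftupStep k ih pos g e (2 * pos + 1) he hk hpos ha hb
          (by unfold pvChild; omega) (by omega)
          (by
            intro j hcj hj
            rcases hcj with rfl | rfl
            · exact pvPle_refl _
            · by_cases hr : 2 * pos + 1 + 1 < e
              · have hx := hsw hr
                have hx' : pvLt (g.getD (2 * pos + 1) (0, 0)) (g.getD (2 * pos + 1 + 1) (0, 0)) = true := by
                  revert hx
                  cases pvLt (g.getD (2 * pos + 1) (0, 0)) (g.getD (2 * pos + 1 + 1) (0, 0)) <;> simp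
                exact pvPle_of_lt hx'
              · omega)
    · rw [dif_neg hch]
      refine ⟨hpos, by omega, rfl, fun i j hcij hj hine => ha i j hcij hj hine,
        fun new => List.Perm.refl _⟩

theorem pvSiftup_ok (g : List (Int × Int)) (h0 : g ≠ [])
    (ha : ∀ i j, pvChild i j → j < g.length → i ≠ 0 →
      pvPle (g.getD i (0, 0)) (g.getD j (0, 0))) :
    pvIsHeap (pvSiftup g 0) ∧ (pvSiftup g 0).Perm g ∧ (pvSiftup g 0).length = g.length := by
  have hpos : 0 < g.length := List.length_pos_of_ne_nil h0
  obtain ⟨r1, r2, r3, r4, r5⟩ := pvSiftupLoop_ok g.length 0 g g.length rfl (by omega) hpos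
    (fun i j hcij hj hine => ha i j hcij hj hine) (by omega)
  unfold pvSiftup
  simp only
  set r := pvSiftupLoop g 0 g.length with hr
  have hq2len : (r.1.set r.2 (g.getD 0 (0, 0))).length = g.length := by simp [r3]
  obtain ⟨s1, s2⟩ := pvSiftdown_ok (r.1.set r.2 (g.getD 0 (0, 0))) r.2
    (by omega) (by omega)
    (by
      intro i j hcij hj hjne
      rw [hq2len] at hj
      have hij : i < j := by rcases hcij with rfl | rfl <;> omega
      have hine : i ≠ r.2 := by
        intro hie
        subst hie
        rcases hcij with rfl | rfl <;> omega
      rw [pvGetD_set_ne _ _ _ _ _ hjne, pvGetD_set_ne _ _ _ _ _ hine]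
      exact r4 i j hcij hj hine)
  refine ⟨s1, ?_, ?_⟩
  · refine s2.trans ((r5 (g.getD 0 (0, 0))).trans ?_)
    rw [List.getD_eq_getElem _ _ hpos, List.set_getElem_self]
  · calc (pvSiftdown (r.1.set r.2 (g.getD 0 (0, 0))) 0 r.2).length
        = (r.1.set r.2 (g.getD 0 (0, 0))).length := ((pvSiftdown_ok _ _ (by omega) (by omega)
          (by
            intro i j hcij hj hjne
            rw [hq2len] at hj
            have hine : i ≠ r.2 := by
              intro hie; subst hie; rcases hcij with rfl | rfl <;> omega
            rw [pvGetD_set_ne _ _ _ _ _ hjne, pvGetD_set_ne _ _ _ _ _ hine]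
            exact r4 i j hcij hj hine)).2).length_eq
      _ = g.length := hq2len

-- ---- heappush / heappop correctness ----
theorem pvHeappush_ok (h : List (Int × Int)) (x : Int × Int) (hh : pvIsHeap h) :
    pvIsHeap (pvHeappush h x) ∧ (pvHeappush h x).Perm (x :: h) := by
  unfold pvHeappush
  obtain ⟨s1, s2⟩ := pvSiftdown_ok (h ++ [x]) h.length (by simp) (by simp; omega)
    (by
      intro i j hcij hj hjne
      rw [List.length_append, List.length_cons, List.length_nil] at hj
      have hij : i < j := by rcases hcij with rfl | rfl <;> omega
      have hjl : j < h.length := by omega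
      rw [pvGetD_append _ _ _ _ hjl, pvGetD_append _ _ _ _ (by omega)]
      exact hh i j hcij hjl)
  exact ⟨s1, s2.trans (List.perm_append_singleton x h)⟩

theorem pvHeappop_ok (h : List (Int × Int)) (hh : pvIsHeap h) (hne : h ≠ []) :
    ((pvHeappop h).1 :: (pvHeappop h).2).Perm h ∧ pvIsHeap (pvHeappop h).2 ∧
    (∀ y ∈ h, pvPle (pvHeappop h).1 y) := by
  have hlpos : 0 < h.length := List.length_pos_of_ne_nil hne
  have hmin : ∀ y ∈ h, pvPle (h.getD 0 (0, 0)) y := by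
    intro y hy
    obtain ⟨j, hj, rfl⟩ := List.mem_iff_getElem.1 hy
    rw [← List.getD_eq_getElem h (0, 0) hj]
    exact pvRoot_min h hh j hj
  by_cases hre : h.dropLast.isEmpty
  · have hl1 : h.length = 1 := by
      have hd : h.dropLast.length = h.length - 1 := List.length_dropLast
      rw [List.isEmpty_iff_length_eq_zero] at hre
      omega
    have hpop : pvHeappop h = (h.getD (h.length - 1) (0, 0), h.dropLast) := by
      unfold pvHeappop
      rw [if_pos hre]
    obtain ⟨a, rfl⟩ := List.length_eq_one_iff.1 hl1
    rw [hpop]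
    refine ⟨by simp, ?_, ?_⟩
    · intro i j hcij hj
      simp at hj
    · simpa using hmin
  · obtain ⟨a, t, rfl⟩ := List.exists_cons_of_ne_nil hne
    have ht : t ≠ [] := by
      intro ht0
      subst ht0
      simp at hre
    set last := (a :: t).getD ((a :: t).length - 1) (0, 0) with hlast
    have hpop : pvHeappop (a :: t) =
        (((a :: t).dropLast).getD 0 (0, 0),
          pvSiftup (((a :: t).dropLast).set 0 last) 0) := by
      unfold pvHeappop
      rw [if_neg hre]
    have hdrop : (a :: t).dropLast = a :: t.dropLast := List.dropLast_cons_of_ne_nil ht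
    have hlast2 : last = t.getLast ht := by
      have h2 : (a :: t).getLast (by simp) = (a :: t)[(a :: t).length - 1]'(by simp) :=
        List.getLast_eq_getElem _
      rw [hlast, List.getD_eq_getElem _ _ (by simp), ← h2, List.getLast_cons ht]
    have hq : ((a :: t).dropLast).set 0 last = last :: t.dropLast := by
      rw [hdrop]
      rfl
    have hqne : (last :: t.dropLast) ≠ [] := by simp
    obtain ⟨s1, s2, _⟩ := pvSiftup_ok (last :: t.dropLast) hqne
      (by
        intro i j hcij hj hine
        simp only [List.length_cons] at hj
        have hij : i < j := by rcases hcij with rfl | rfl <;> omega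
        have hjlen : j < (a :: t).length - 1 := by
          have : t.dropLast.length = t.length - 1 := List.length_dropLast
          simp only [List.length_cons]
          omega
        have hgv : ∀ m, m ≠ 0 → m < (a :: t).length - 1 →
            (last :: t.dropLast).getD m (0, 0) = (a :: t).getD m (0, 0) := by
          intro m hm0 hml
          have hml' : m < (last :: t.dropLast).length := by
            have : t.dropLast.length = t.length - 1 := List.length_dropLast
            simp only [List.length_cons]
            simp only [List.length_cons] at hml
            omega
          rw [List.getD_eq_getElem _ _ hml', List.getD_eq_getElem _ _ (by
            simp only [List.length_cons] at hml ⊢; omega)]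
          have hml2 : m - 1 < t.dropLast.length := by
            simp only [List.length_cons] at hml
            have : t.dropLast.length = t.length - 1 := List.length_dropLast
            omega
          calc (last :: t.dropLast)[m]'hml' = t.dropLast[m - 1]'hml2 := by
                have hmm : m = (m - 1) + 1 := by omega
                rw [List.getElem_cons]
                simp [hm0]
            _ = t[m - 1]'(by have := t.dropLast.length; simp at hml2; omega) := List.getElem_dropLast _
            _ = (a :: t)[m]'(by simp only [List.length_cons] at hml ⊢; omega) := by
                rw [List.getElem_cons]
                simp [hm0]
        rw [hgv i hine (by omega), hgv j (by omega) hjlen]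
        exact hh i j hcij (by simp only [List.length_cons] at hjlen ⊢; omega))
    rw [hpop, hq]
    have hfirst : ((a :: t).dropLast).getD 0 (0, 0) = a := by
      rw [hdrop]
      rfl
    refine ⟨?_, s1, ?_⟩
    · rw [hfirst]
      refine (List.Perm.cons a (s2.trans ?_))
      have e1 : (last :: t.dropLast).Perm (t.dropLast ++ [last]) :=
        (List.perm_append_singleton _ _).symm
      have e3 : (t.dropLast ++ [last]).Perm t := by
        rw [hlast2, List.dropLast_append_getLast ht]
      exact e1.trans e3
    · rw [hfirst]
      have : (a :: t).getD 0 (0, 0) = a := rfl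
      exact this ▸ hmin

-- ---- iterated pops ----
def pvPopN : Nat → List (Int × Int) → List (Int × Int)
  | 0, h => h
  | k + 1, h => pvPopN k (pvHeappop h).2

def pvPops : Nat → List (Int × Int) → List (Int × Int)
  | 0, _ => []
  | k + 1, h => (pvHeappop h).1 :: pvPops k (pvHeappop h).2

theorem pvFoldPop (l : List Int) : ∀ h : List (Int × Int),
    l.foldl (fun h _ => (pvHeappop h).2) h = pvPopN l.length h := by
  induction l with
  | nil => intro h; rfl
  | cons x xs ih => intro h; rw [List.foldl_cons, List.length_cons]; exact ih _

theorem pvHeappop_len' (h : List (Int × Int)) (hne : h ≠ []) :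
    ((pvHeappop h).2).length + 1 = h.length := pvHeappop_len h hne

theorem pvPopN_ok : ∀ (k : Nat) (h : List (Int × Int)), pvIsHeap h → k ≤ h.length →
    (pvPops k h ++ pvPopN k h).Perm h ∧ pvIsHeap (pvPopN k h) ∧
    List.Pairwise pvPle (pvPops k h) ∧
    (∀ x ∈ pvPops k h, ∀ y ∈ pvPopN k h, pvPle x y) ∧
    (pvPops k h).length = k := by
  intro k
  induction k with
  | zero => intro h hh _; exact ⟨by simp [pvPops, pvPopN], hh, by simp [pvPops], by simp [pvPops], rfl⟩
  | succ k ih =>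
    intro h hh hk
    have hne : h ≠ [] := by
      intro h0; subst h0; simp at hk
    obtain ⟨p1, p2, p3⟩ := pvHeappop_ok h hh hne
    have hlen := pvHeappop_len' h hne
    obtain ⟨q1, q2, q3, q4, q5⟩ := ih (pvHeappop h).2 p2 (by omega)
    have hsub : ∀ y ∈ (pvHeappop h).2, y ∈ h := fun y hy => p1.mem_iff.1 (by simp [hy])
    refine ⟨?_, q2, ?_, ?_, by simp [pvPops, q5]⟩
    · show (((pvHeappop h).1 :: pvPops k (pvHeappop h).2) ++ pvPopN k (pvHeappop h).2).Perm h
      have e1 : ((pvHeappop h).1 :: pvPops k (pvHeappop h).2) ++ pvPopN k (pvHeappop h).2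
          = (pvHeappop h).1 :: (pvPops k (pvHeappop h).2 ++ pvPopN k (pvHeappop h).2) := by simp
      rw [e1]
      exact (List.Perm.cons _ q1).trans p1
    · show List.Pairwise pvPle ((pvHeappop h).1 :: pvPops k (pvHeappop h).2)
      refine List.pairwise_cons.2 ⟨?_, q3⟩
      intro y hy
      have : y ∈ pvPops k (pvHeappop h).2 ++ pvPopN k (pvHeappop h).2 := by simp [hy]
      exact p3 y (hsub y (q1.mem_iff.1 this))
    · intro x hx y hy
      rw [show pvPops (k+1) h = (pvHeappop h).1 :: pvPops k (pvHeappop h).2 from rfl] at hx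
      have hy' : y ∈ pvPopN k (pvHeappop h).2 := hy
      rcases List.mem_cons.1 hx with rfl | hx'
      · have : y ∈ pvPops k (pvHeappop h).2 ++ pvPopN k (pvHeappop h).2 := by simp [hy']
        exact p3 y (hsub y (q1.mem_iff.1 this))
      · exact q4 x hx' y hy'

-- ---- heap build and drain ----
theorem pvBuild_ok (w : List Int) : ∀ (l : List Int) (h : List (Int × Int)), pvIsHeap h →
    pvIsHeap (l.foldl (fun hh i => pvHeappush hh (-(PySem.List.pyGetD w i 0), i)) h) ∧
    (l.foldl (fun hh i => pvHeappush hh (-(PySem.List.pyGetD w i 0), i)) h).Perm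
      (l.map (fun i => (-(PySem.List.pyGetD w i 0), i)) ++ h) := by
  intro l
  induction l with
  | nil => intro h hh; exact ⟨hh, by simp⟩
  | cons x xs ih =>
    intro h hh
    obtain ⟨s1, s2⟩ := pvHeappush_ok h (-(PySem.List.pyGetD w x 0), x) hh
    obtain ⟨t1, t2⟩ := ih (pvHeappush h (-(PySem.List.pyGetD w x 0), x)) s1
    rw [List.foldl_cons]
    refine ⟨t1, t2.trans ?_⟩
    have e1 := (List.Perm.append_left (xs.map (fun i => (-(PySem.List.pyGetD w i 0), i))) s2).trans
      (List.perm_middle (a := (-(PySem.List.pyGetD w x 0), x))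
        (l₁ := xs.map (fun i => (-(PySem.List.pyGetD w i 0), i))) (l₂ := h))
    simpa using e1

theorem pvDrain_eq : ∀ (k : Nat) (h : List (Int × Int)) (acc : Int), h.length ≤ k → pvIsHeap h →
    pvDrain h acc = acc - ((h.map (·.1)).sum) := by
  intro k
  induction k with
  | zero =>
    intro h acc hk _
    have : h = [] := List.length_eq_zero_iff.1 (by omega)
    subst this
    rw [pvDrain]
    simp
  | succ k ih =>
    intro h acc hk hh
    rw [pvDrain]
    by_cases he : h.isEmpty
    · rw [dif_pos he]
      rw [List.isEmpty_iff] at he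
      subst he
      simp
    · rw [dif_neg he]
      rw [List.isEmpty_iff] at he
      obtain ⟨p1, p2, _⟩ := pvHeappop_ok h hh he
      have hlen := pvHeappop_len' h he
      rw [ih (pvHeappop h).2 (acc - (pvHeappop h).1.1) (by omega) p2]
      have hsum : ((h.map (·.1)).sum) = (pvHeappop h).1.1 + (((pvHeappop h).2.map (·.1)).sum) := by
        have := (p1.map (·.1)).sum_eq
        simp only [List.map_cons, List.sum_cons] at this
        omega
      omega

-- ---- quorum weight: heap pops versus sort-and-slice ----
theorem pvIsHeap_nil : pvIsHeap [] := by
  intro i j _ hj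
  simp at hj

theorem pvMapNegSum (l : List (Int × Int)) :
    (l.map (fun p => -p.1)).sum = -((l.map (·.1)).sum) := by
  induction l with
  | nil => simp
  | cons x xs ih => simp [ih]; omega

theorem pvRangeMapW (n : Int) (w : List Int) (h1 : max n 0 ≤ (w.length : Int)) :
    (PySem.List.pyRange 0 n 1).map (fun i => PySem.List.pyGetD w i 0) = w.take n.toNat := by
  by_cases hn : n ≤ 0
  · rw [PySem.List.pyRange_one_eq_nil hn]
    have : n.toNat = 0 := by omega
    rw [this]
    simp
  · have hcast : n = ((n.toNat : Nat) : Int) := by omega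
    rw [hcast, PySem.List.pyRange_zero_natCast, List.map_map]
    have hlen : n.toNat ≤ w.length := by omega
    apply List.ext_getElem
    · simp
      omega
    · intro i hi1 hi2
      simp only [List.getElem_map, List.getElem_range, Function.comp_apply,
        PySem.List.pyGetD_natCast, List.getElem_take]
      rw [List.getD_eq_getElem _ _ (by simp at hi1; omega)]

theorem pvQw_eq (n f : Int) (w : List Int)
    (h1 : max n 0 ≤ (w.length : Int)) (h2 : f ≤ max n 0) :
    pvDrain ((PySem.List.pyRange 0 f 1).foldl (fun h _ => (pvHeappop h).2)
        ((PySem.List.pyRange 0 n 1).foldl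
          (fun h replicaIdx => pvHeappush h (-(PySem.List.pyGetD w replicaIdx 0), replicaIdx)) [])) 0
    = (PySem.List.slice
        (PySem.List.sorted (PySem.List.slice w none (some (max n 0))) (fun x => x) false)
        none
        (some (((PySem.List.sorted (PySem.List.slice w none (some (max n 0)))
          (fun x => x) false).length : Int) - f))).sum := by
  have hmax : (max n 0) = ((n.toNat : Nat) : Int) := by omega
  have hn'w : n.toNat ≤ w.length := by omega
  have hsl : PySem.List.slice w none (some (max n 0)) = w.take n.toNat := by
    rw [hmax, PySem.List.slice_to w (by omega)]
    simp
    omega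
  obtain ⟨hb1, hb2⟩ := pvBuild_ok w (PySem.List.pyRange 0 n 1) [] pvIsHeap_nil
  rw [List.append_nil] at hb2
  set heap0 := (PySem.List.pyRange 0 n 1).foldl
    (fun h replicaIdx => pvHeappush h (-(PySem.List.pyGetD w replicaIdx 0), replicaIdx)) [] with hheap0
  have hlenr : (PySem.List.pyRange 0 n 1).length = n.toNat := by
    rw [PySem.List.length_pyRange_one]
    simp
  have hlenh : heap0.length = n.toNat := by
    rw [hb2.length_eq, List.length_map, hlenr]
  have hlenf : (PySem.List.pyRange 0 f 1).length = f.toNat := by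
    rw [PySem.List.length_pyRange_one]
    simp
  rw [pvFoldPop, hlenf]
  have hkf : f.toNat ≤ heap0.length := by omega
  obtain ⟨P1, P2, P3, P4, P5⟩ := pvPopN_ok f.toNat heap0 hb1 hkf
  have hlenpop : (pvPopN f.toNat heap0).length = n.toNat - f.toNat := by
    have := P1.length_eq
    rw [List.length_append] at this
    omega
  rw [pvDrain_eq (pvPopN f.toNat heap0).length _ _ le_rfl P2]
  rw [zero_sub, ← pvMapNegSum]
  set C := (pvPopN f.toNat heap0).map (fun p => -p.1) with hC
  set R := (pvPops f.toNat heap0).map (fun p => -p.1) with hR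
  set sortedC := PySem.List.sorted C (fun x => x) false with hsC
  have hTperm : (sortedC ++ R.reverse).Perm (w.take n.toNat) := by
    refine ((PySem.List.sorted_perm C (fun x => x) false).append (List.reverse_perm R)).trans ?_
    rw [← List.map_append]
    refine ((List.perm_append_comm.map _).trans ((P1.map _).trans (hb2.map _))).trans ?_
    rw [List.map_map]
    have : ((fun p => -p.1) ∘ (fun i => (-(PySem.List.pyGetD w i 0), i)))
        = fun i => PySem.List.pyGetD w i 0 := by
      funext i
      simp
    rw [this, pvRangeMapW n w h1]
  have hTpair : (sortedC ++ R.reverse).Pairwise (fun a b => a ≤ b) := by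
    rw [List.pairwise_append]
    refine ⟨PySem.List.sorted_pairwise C (fun x => x), ?_, ?_⟩
    · rw [List.pairwise_reverse]
      exact P3.map _ (fun a b hab => by
        rcases hab with hl | ⟨he, _⟩
        · omega
        · omega)
    · intro a ha b hb
      rw [hsC, PySem.List.mem_sorted] at ha
      rw [List.mem_reverse] at hb
      rw [hC] at ha
      rw [hR] at hb
      obtain ⟨y, hy, rfl⟩ := List.mem_map.1 ha
      obtain ⟨x, hx, rfl⟩ := List.mem_map.1 hb
      have := P4 x hx y hy
      rcases this with hl | ⟨he, _⟩ <;> omega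
  have hTs : PySem.List.sorted (w.take n.toNat) (fun x => x) false = sortedC ++ R.reverse := by
    refine PySem.List.eq_of_perm_of_pairwise_le_of_injective (fun x => x)
      (fun a b hab => hab) ?_ ?_ hTpair
    · exact (PySem.List.sorted_perm _ _ false).trans hTperm.symm
    · exact PySem.List.sorted_pairwise _ _
  rw [hsl, hTs]
  have hlens : sortedC.length = n.toNat - f.toNat := by
    rw [hsC, PySem.List.length_sorted, hC, List.length_map, hlenpop]
  have hlenR : R.length = f.toNat := by
    rw [hR, List.length_map, P5]
  have hlenT : (sortedC ++ R.reverse).length = n.toNat := by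
    rw [List.length_append, List.length_reverse, hlens, hlenR]
    omega
  have hnn : (0 : Int) ≤ ((sortedC ++ R.reverse).length : Int) - f := by
    rw [hlenT]
    omega
  rw [PySem.List.slice_to _ hnn]
  have hsum : sortedC.sum = C.sum := (PySem.List.sorted_perm _ _ false).sum_eq
  by_cases hf : 0 ≤ f
  · have htoNat : ((((sortedC ++ R.reverse).length : Int) - f)).toNat = sortedC.length := by
      rw [hlenT, hlens]
      omega
    rw [htoNat, List.take_left]
    rw [hsum]
  · have hkf0 : f.toNat = 0 := by omega
    have hRnil : R = [] := List.length_eq_zero_iff.1 (by rw [hlenR, hkf0])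
    have htoNat : (sortedC ++ R.reverse).length ≤ ((((sortedC ++ R.reverse).length : Int) - f)).toNat := by
      omega
    rw [List.take_of_length_le htoNat, hRnil]
    simp [hsum]

-- ---- last element / sortedness helpers ----
theorem pvLast_eq (s : List Int) (h : s ≠ []) :
    PySem.List.pyGetD s (-1) 0 = s.getLast h := by
  have hl : 0 < s.length := List.length_pos_of_ne_nil h
  simp only [PySem.List.pyGetD, PySem.List.pyGet?, PySem.List.pyIdx?]
  have c1 : ¬((0 : Int) ≤ -1) := by omega
  have c2 : -(s.length : Int) ≤ -1 := by omega
  rw [if_neg c1, if_pos c2]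
  have h3 : s.length - (-(-1 : Int)).toNat = s.length - 1 := by simp
  rw [h3]
  simp only [Option.bind]
  rw [List.getElem?_eq_getElem (by omega), ← List.getLast_eq_getElem]
  rfl

theorem pvLe_getLast (s : List Int) (h : s ≠ []) (hp : s.Pairwise (· < ·)) :
    ∀ x ∈ s, x ≤ s.getLast h := by
  induction s with
  | nil => simp at h
  | cons a t ih =>
    intro x hx
    rcases List.mem_cons.1 hx with rfl | hx'
    · by_cases ht : t = []
      · subst ht
        simp
      · rw [List.getLast_cons ht]
        have := (List.pairwise_cons.1 hp).1 (t.getLast ht) (List.getLast_mem ht)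
        omega
    · have ht : t ≠ [] := List.ne_nil_of_mem hx'
      rw [List.getLast_cons ht]
      exact ih ht (List.pairwise_cons.1 hp).2 x hx'

theorem pvAppend_sorted (s : List Int) (i : Int) (hne : s ≠ [])
    (hp : s.Pairwise (· < ·)) (hgt : PySem.List.pyGetD s (-1) 0 < i) :
    (s ++ [i]).Pairwise (· < ·) := by
  rw [List.pairwise_append]
  refine ⟨hp, by simp, ?_⟩
  intro x hx y hy
  rcases List.mem_singleton.1 hy with rfl
  have := pvLe_getLast s hne hp x hx
  rw [pvLast_eq s hne] at hgt
  omega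

-- ---- the DFS recursion, unfolded over the bare range ----
theorem pvDfs_eq (n qw : Int) (w : List Int) (s : List Int) (t : Int) :
    pvDfs n qw w s t
    = (PySem.List.pyRange (PySem.List.pyGetD s (-1) 0 + 1) n 1).flatMap
        (fun i => if t + PySem.List.pyGetD w i 0 ≥ qw then [s ++ [i]]
          else pvDfs n qw w (s ++ [i]) (t + PySem.List.pyGetD w i 0)) := by
  rw [pvDfs]
  simp

-- running subset total, as A's valid_quorum recomputes it
def pvSumOf (w : List Int) (s : List Int) : Int :=
  s.foldl (fun a r => a + PySem.List.pyGetD w r 0) 0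

theorem pvSumOf_append (w : List Int) (s : List Int) (i : Int) :
    pvSumOf w (s ++ [i]) = pvSumOf w s + PySem.List.pyGetD w i 0 := by
  simp [pvSumOf, List.foldl_append]

theorem pvValidQuorum_sum (s : List Int) (w : List Int) (qw : Int) :
    pvValidQuorum s w qw = decide (pvSumOf w s ≥ qw) := rfl

-- one-step extensions of a single subset
def pvExtOne (n : Int) (s : List Int) : List (List Int) :=
  (PySem.List.pyRange (PySem.List.pyGetD s (-1) 0 + 1) n 1).map (fun i => s ++ [i])

theorem pvExt_eq_flatMap (n : Int) (subsets : List (List Int)) :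
    pvExt n subsets = subsets.flatMap (pvExtOne n) := rfl

-- a loop interleaving "append one result / recurse" is, up to order,
-- the kept extensions followed by the recursions on the rejected ones
theorem pvInterleave {α β : Type} (p : α → Bool) (a : α → β) (h : α → List β) :
    ∀ l : List α, (l.flatMap (fun x => if p x then [a x] else h x)).Perm
      (((l.filter p).map a) ++ (l.filter (fun x => !p x)).flatMap h) := by
  intro l
  induction l with
  | nil => simp
  | cons x xs ih =>
    by_cases hp : p x = true
    · simpa [hp] using ih.cons (a x)
    · have hp' : p x = false := Bool.not_eq_true _ |>.mp hp
      have e1 : List.filter p (x :: xs) = List.filter p xs := List.filter_cons_of_neg hp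
      have e2 : List.filter (fun y => !p y) (x :: xs) = x :: List.filter (fun y => !p y) xs :=
        List.filter_cons_of_pos (by simp [hp'])
      rw [List.flatMap_cons, if_neg hp, e1, e2, List.flatMap_cons]
      refine (ih.append_left (h x)).trans ?_
      rw [← List.append_assoc, ← List.append_assoc]
      exact (List.perm_append_comm).append_right _

theorem pvMapFilter {α β : Type} (l : List α) (a : α → β) (p : α → Bool) (q : β → Bool)
    (h : ∀ x ∈ l, p x = q (a x)) : (l.filter p).map a = (l.map a).filter q := by
  induction l with
  | nil => simp
  | cons x xs ih =>
    have hx := h x (by simp)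
    by_cases hp : p x = true
    · rw [List.filter_cons_of_pos hp, List.map_cons, List.map_cons,
        List.filter_cons_of_pos (by rw [← hx]; exact hp), ih (fun y hy => h y (by simp [hy]))]
    · rw [List.filter_cons_of_neg hp, List.map_cons,
        List.filter_cons_of_neg (by rw [← hx]; exact hp), ih (fun y hy => h y (by simp [hy]))]

-- one unfolding of the DFS matches one BFS level step on a single subset
theorem pvDfs_perm (n qw : Int) (w : List Int) (s : List Int) (t : Int)
    (ht : t = pvSumOf w s) :
    (pvDfs n qw w s t).Perm
      ((pvExtOne n s).filter (fun u => pvValidQuorum u w qw)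
        ++ ((pvExtOne n s).filter (fun u => !pvValidQuorum u w qw)).flatMap
             (fun u => pvDfs n qw w u (pvSumOf w u))) := by
  rw [pvDfs_eq]
  have hI := pvInterleave (fun i => decide (t + PySem.List.pyGetD w i 0 ≥ qw))
    (fun i => s ++ [i]) (fun i => pvDfs n qw w (s ++ [i]) (t + PySem.List.pyGetD w i 0))
    (PySem.List.pyRange (PySem.List.pyGetD s (-1) 0 + 1) n 1)
  simp only [decide_eq_true_eq] at hI
  refine hI.trans ?_
  have hpt : ∀ i, decide (t + PySem.List.pyGetD w i 0 ≥ qw)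
      = pvValidQuorum (s ++ [i]) w qw := by
    intro i
    rw [pvValidQuorum_sum, pvSumOf_append, ht]
  have e1 : ((PySem.List.pyRange (PySem.List.pyGetD s (-1) 0 + 1) n 1).filter
        (fun i => decide (t + PySem.List.pyGetD w i 0 ≥ qw))).map (fun i => s ++ [i])
      = (pvExtOne n s).filter (fun u => pvValidQuorum u w qw) := by
    rw [pvExtOne]
    exact pvMapFilter _ _ _ _ (fun i _ => hpt i)
  have e2 : ((PySem.List.pyRange (PySem.List.pyGetD s (-1) 0 + 1) n 1).filter
        (fun i => !decide (t + PySem.List.pyGetD w i 0 ≥ qw))).flatMap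
          (fun i => pvDfs n qw w (s ++ [i]) (t + PySem.List.pyGetD w i 0))
      = ((pvExtOne n s).filter (fun u => !pvValidQuorum u w qw)).flatMap
          (fun u => pvDfs n qw w u (pvSumOf w u)) := by
    rw [pvExtOne, ← pvMapFilter _ _
      (fun i => !decide (t + PySem.List.pyGetD w i 0 ≥ qw)) _ (fun i _ => by simp only [hpt]),
      List.flatMap_map]
    refine List.flatMap_congr (fun i _ => ?_)
    rw [pvSumOf_append, ht]
  rw [e1, e2]

-- ... lifted to a whole frontier
theorem pvFlat_perm (n qw : Int) (w : List Int) (fr : List (List Int)) :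
    (fr.flatMap (fun s => pvDfs n qw w s (pvSumOf w s))).Perm
      ((pvExt n fr).filter (fun u => pvValidQuorum u w qw)
        ++ ((pvExt n fr).filter (fun u => !pvValidQuorum u w qw)).flatMap
             (fun u => pvDfs n qw w u (pvSumOf w u))) := by
  refine (List.Perm.flatMap_left fr (fun s _ => pvDfs_perm n qw w s _ rfl)).trans ?_
  refine (List.flatMap_append_perm fr _ _).symm.trans ?_
  rw [pvExt_eq_flatMap, List.filter_flatMap, List.filter_flatMap, List.flatMap_assoc]

-- if a subset has nothing left to extend with, its DFS is empty
theorem pvDfs_nil (n qw : Int) (w : List Int) (s : List Int) (t : Int)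
    (h : ¬(PySem.List.pyGetD s (-1) 0 + 1 < n)) : pvDfs n qw w s t = [] := by
  rw [pvDfs_eq, PySem.List.pyRange_one_eq_nil (by omega)]
  rfl

-- the breadth-first loop of A collects, up to order, exactly the DFS leaves of its frontier
theorem pvLoop_perm (n qw : Int) (w : List Int) :
    ∀ (N : Nat) (fr : List (List Int)) (valid : List (List Int)),
      pvLevelMeasure n fr ≤ N →
      (pvCvqLoop n w qw valid fr).Perm
        (valid ++ fr.flatMap (fun s => pvDfs n qw w s (pvSumOf w s))) := by
  intro N
  induction N with
  | zero =>
    intro fr valid hN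
    have hfr : fr = [] := by
      rcases fr with _ | ⟨s, fr'⟩
      · rfl
      · exfalso
        have hmem : pvVal n s ∈ (s :: fr').map (pvVal n) := by simp
        have := pvMem_le_foldr_max hmem
        have hv : 0 < pvVal n s := by simp only [pvVal]; omega
        simp only [pvLevelMeasure] at hN
        omega
    subst hfr
    rw [pvCvqLoop]
    simp [pvCvqIter_eq, pvExt]
  | succ N ih =>
    intro fr valid hN
    rw [pvCvqLoop]
    simp only [pvCvqIter_eq]
    by_cases hok : fr.any (fun s => decide (PySem.List.pyGetD s (-1) 0 + 1 < n)) = true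
    · rw [if_pos hok]
      have h0 : 0 < pvLevelMeasure n fr := by
        rcases List.any_eq_true.1 hok with ⟨s, hs, _⟩
        have hv : 0 < pvVal n s := by simp only [pvVal]; omega
        exact lt_of_lt_of_le hv (pvMem_le_foldr_max (List.mem_map_of_mem hs))
      have hdec : pvLevelMeasure n
          ((pvExt n fr).filter (fun u => !pvValidQuorum u w qw)) < pvLevelMeasure n fr :=
        pvMeasure_lt_of_sub n fr _ h0 (fun u hu => pvExt_val (List.mem_of_mem_filter hu))
      refine (ih _ _ (by omega)).trans ?_
      rw [List.append_assoc]
      exact (pvFlat_perm n qw w fr).symm.append_left valid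
    · rw [if_neg hok]
      have hok' : ∀ s ∈ fr, ¬(PySem.List.pyGetD s (-1) 0 + 1 < n) := by
        intro s hs
        have hf : fr.any (fun s => decide (PySem.List.pyGetD s (-1) 0 + 1 < n)) = false :=
          Bool.not_eq_true _ |>.mp hok
        have := List.any_eq_false.1 hf s hs
        simpa using this
      have hnil : ∀ s ∈ fr, pvDfs n qw w s (pvSumOf w s) = [] := by
        intro s hs
        exact pvDfs_nil n qw w s _ (hok' s hs)
      have hext : pvExt n fr = [] := by
        rw [pvExt, List.flatMap_eq_nil_iff]
        intro s hs
        rw [PySem.List.pyRange_one_eq_nil (by have := hok' s hs; omega)]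
        simp
      rw [hext, List.flatMap_eq_nil_iff.2 hnil]
      simp

-- every quorum the DFS finds is strictly increasing
theorem pvDfs_sorted (n qw : Int) (w : List Int) :
    ∀ (N : Nat) (s : List Int) (t : Int), pvVal n s ≤ N → s ≠ [] → s.Pairwise (· < ·) →
      ∀ q ∈ pvDfs n qw w s t, q.Pairwise (· < ·) := by
  intro N
  induction N with
  | zero =>
    intro s t hN _ _ q hq
    exfalso
    have : 0 < pvVal n s := by simp only [pvVal]; omega
    omega
  | succ N ih =>
    intro s t hN hne hp q hq
    rw [pvDfs_eq] at hq
    rcases List.mem_flatMap.1 hq with ⟨i, hi, hq2⟩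
    have hri := PySem.List.mem_pyRange_one.1 hi
    have hsorted : (s ++ [i]).Pairwise (· < ·) := pvAppend_sorted s i hne hp (by omega)
    by_cases hc : t + PySem.List.pyGetD w i 0 ≥ qw
    · rw [if_pos hc] at hq2
      rcases List.mem_singleton.1 hq2 with rfl
      exact hsorted
    · rw [if_neg hc] at hq2
      have hval : pvVal n (s ++ [i]) ≤ N := by
        simp only [pvVal, pvLast_append] at hN ⊢
        omega
      exact ih (s ++ [i]) _ hval (by simp) hsorted q hq2

-- ---- pairwise-overlap check: counting loop versus set intersection ----
theorem pvPairCheck (f : Int) (q1 q2 : List Int) (hnd1 : q1.Nodup) :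
    (decide (q1.foldl
        (fun ov element => if q2.contains element then ov + 1 else ov) (0 : Int) < f + 1))
    = decide (((PySem.Set.inter (PySem.Set.ofList q1) (PySem.Set.ofList q2)).length : Int) ≤ f) := by
  rw [PySem.List.foldl_if_add_one (fun element => q2.contains element) q1 0]
  have hof : PySem.Set.ofList q1 = q1 := PySem.Set.ofList_eq_self_of_nodup q1 hnd1
  have hint : (PySem.Set.inter (PySem.Set.ofList q1) (PySem.Set.ofList q2)).length
      = q1.countP (fun element => q2.contains element) := by
    show ((PySem.Set.ofList q1).filter (fun x => (PySem.Set.ofList q2).contains x)).length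
      = q1.countP (fun element => q2.contains element)
    rw [hof, ← List.countP_eq_length_filter]
    refine List.countP_congr ?_
    intro x _
    simp [PySem.Set.contains, List.contains_eq_mem, PySem.Set.mem_ofList]
  rw [hint]
  exact decide_eq_decide.2 (by omega)

theorem pvCheck_eq (f : Int) (L : List (List Int)) (hL : ∀ q ∈ L, q.Pairwise (· < ·)) :
    ((PySem.List.pyRange 0 (L.length : Int) 1).any (fun i =>
      (PySem.List.pyRange (i + 1) (L.length : Int) 1).any (fun j =>
        decide ((PySem.List.pyGetD L i []).foldl
          (fun ov element => if (PySem.List.pyGetD L j []).contains element then ov + 1 else ov)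
          (0 : Int) < f + 1))))
    = ((PySem.List.pyRange 0 (L.length : Int) 1).any (fun i =>
      (PySem.List.slice L (some (i + 1)) none).any (fun q2 =>
        decide (((PySem.Set.inter (PySem.Set.ofList (PySem.List.pyGetD L i []))
          (PySem.Set.ofList q2)).length : Int) ≤ f)))) := by
  refine PySem.List.any_congr_mem ?_
  intro i hi
  have hi' := PySem.List.mem_pyRange_one.1 hi
  have hq1mem : PySem.List.pyGetD L i [] ∈ L := by
    have hcast : i = ((i.toNat : Nat) : Int) := by omega
    rw [hcast, PySem.List.pyGetD_natCast, List.getD_eq_getElem _ _ (by omega)]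
    exact List.getElem_mem _
  have hnd1 : (PySem.List.pyGetD L i []).Nodup :=
    List.Pairwise.imp (fun {a b} h => Int.ne_of_lt h) (hL _ hq1mem)
  have hmap := PySem.List.map_pyGetD_pyRange' L ([] : List Int) (a := i + 1) (by omega)
  rw [PySem.List.slice_from L (by omega : (0 : Int) ≤ i + 1)]
  rw [← hmap, List.any_map]
  refine PySem.List.any_congr_mem ?_
  intro j _
  simp only [Function.comp_apply]
  exact pvPairCheck f _ _ hnd1

-- ---- the pairwise check is order-invariant ----
def pvAnyPairs (P : List Int → List Int → Bool) : List (List Int) → Bool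
  | [] => false
  | q :: qs => qs.any (P q) || pvAnyPairs P qs

theorem pvAnyIdx (P : List Int → List Int → Bool) :
    ∀ L : List (List Int),
      ((PySem.List.pyRange 0 (L.length : Int) 1).any (fun i =>
        (PySem.List.slice L (some (i + 1)) none).any (P (PySem.List.pyGetD L i []))))
      = pvAnyPairs P L := by
  intro L
  induction L with
  | nil =>
    rw [show ((([] : List (List Int)).length : Int) = 0) from rfl,
      PySem.List.pyRange_one_eq_nil (by omega)]
    rfl
  | cons q qs ih =>
    have hlen : (((q :: qs).length : Int)) = (qs.length : Int) + 1 := by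
      simp
    rw [hlen, PySem.List.pyRange_one_cons (by omega), List.any_cons]
    have hfirst : ((PySem.List.slice (q :: qs) (some ((0 : Int) + 1)) none).any
        (P (PySem.List.pyGetD (q :: qs) 0 []))) = qs.any (P q) := by
      rw [PySem.List.slice_from _ (by omega : (0 : Int) ≤ 0 + 1),
        PySem.List.pyGetD_of_nonneg _ _ (by omega : (0 : Int) ≤ 0)]
      norm_num
    have hshift : PySem.List.pyRange (0 + 1) ((qs.length : Int) + 1) 1
        = (PySem.List.pyRange 0 (qs.length : Int) 1).map (fun x => x + 1) := by
      rw [PySem.List.pyRange_one, PySem.List.pyRange_one, List.map_map]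
      have e1 : ((qs.length : Int) + 1 - (0 + 1)).toNat = qs.length := by omega
      have e2 : ((qs.length : Int) - 0).toNat = qs.length := by omega
      rw [e1, e2]
      refine List.map_congr_left (fun k _ => ?_)
      simp only [Function.comp_apply]
      omega
    rw [hshift, List.any_map]
    have hrest : ((PySem.List.pyRange 0 (qs.length : Int) 1).any
        ((fun i => (PySem.List.slice (q :: qs) (some (i + 1)) none).any
          (P (PySem.List.pyGetD (q :: qs) i []))) ∘ (fun x => x + 1)))
        = pvAnyPairs P qs := by
      rw [← ih]
      refine PySem.List.any_congr_mem ?_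
      intro i hi
      have hi' := PySem.List.mem_pyRange_one.1 hi
      simp only [Function.comp_apply]
      have hg : PySem.List.pyGetD (q :: qs) (i + 1) [] = PySem.List.pyGetD qs i [] := by
        rw [PySem.List.pyGetD_of_nonneg _ _ (by omega : (0 : Int) ≤ i + 1),
          PySem.List.pyGetD_of_nonneg _ _ (by omega : (0 : Int) ≤ i)]
        have : (i + 1).toNat = i.toNat + 1 := by omega
        rw [this, List.getD_cons_succ]
      have hs : PySem.List.slice (q :: qs) (some (i + 1 + 1)) none
          = PySem.List.slice qs (some (i + 1)) none := by
        rw [PySem.List.slice_from _ (by omega : (0 : Int) ≤ i + 1 + 1),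
          PySem.List.slice_from _ (by omega : (0 : Int) ≤ i + 1)]
        have : (i + 1 + 1).toNat = (i + 1).toNat + 1 := by omega
        rw [this, List.drop_succ_cons]
      rw [hg, hs]
    rw [hfirst, hrest]
    rfl

theorem pvAnyPairs_eq_false (P : List Int → List Int → Bool) :
    ∀ L : List (List Int), pvAnyPairs P L = false ↔ L.Pairwise (fun a b => P a b = false) := by
  intro L
  induction L with
  | nil => simp [pvAnyPairs]
  | cons q qs ih =>
    simp [pvAnyPairs, List.pairwise_cons, ih, List.any_eq_false, and_comm]

theorem pvAnyPairs_perm (P : List Int → List Int → Bool)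
    (hsymm : ∀ a b, P a b = P b a) {L L' : List (List Int)} (h : L.Perm L') :
    pvAnyPairs P L = pvAnyPairs P L' := by
  have hsym : ∀ {x y : List Int}, P x y = false → P y x = false := by
    intro x y hab
    rw [hsymm]
    exact hab
  by_cases hb : pvAnyPairs P L = false
  · rw [hb]
    symm
    rw [pvAnyPairs_eq_false]
    exact (h.pairwise_iff hsym).1 ((pvAnyPairs_eq_false P L).1 hb)
  · have h1 : pvAnyPairs P L = true := by
      revert hb; cases pvAnyPairs P L <;> simp
    rw [h1]
    symm
    by_contra hb'
    have h2 : pvAnyPairs P L' = false := by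
      revert hb'; cases pvAnyPairs P L' <;> simp
    have := (h.pairwise_iff hsym).2 ((pvAnyPairs_eq_false P L').1 h2)
    rw [(pvAnyPairs_eq_false P L).2 this] at h1
    exact absurd h1 (by simp)

theorem pvInterLen_comm (a b : List Int) :
    (PySem.Set.inter (PySem.Set.ofList a) (PySem.Set.ofList b)).length
      = (PySem.Set.inter (PySem.Set.ofList b) (PySem.Set.ofList a)).length := by
  have nd1 : (PySem.Set.inter (PySem.Set.ofList a) (PySem.Set.ofList b)).Nodup :=
    PySem.Set.nodup_inter _ _ (PySem.Set.nodup_ofList a)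
  have nd2 : (PySem.Set.inter (PySem.Set.ofList b) (PySem.Set.ofList a)).Nodup :=
    PySem.Set.nodup_inter _ _ (PySem.Set.nodup_ofList b)
  have hfs : (PySem.Set.inter (PySem.Set.ofList a) (PySem.Set.ofList b)).toFinset
      = (PySem.Set.inter (PySem.Set.ofList b) (PySem.Set.ofList a)).toFinset := by
    apply Finset.ext
    intro x
    simp only [List.mem_toFinset, PySem.Set.mem_inter, PySem.Set.mem_ofList]
    exact and_comm
  rw [← List.toFinset_card_of_nodup nd1, ← List.toFinset_card_of_nodup nd2, hfs]

-- ---- main equivalence ----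
theorem pv_main : ∀ (n : Int) (f : Int) (delta : Int) (weights : List Int),
    Pre_compute_quorum_weight n f delta weights →
    compute_quorum_weight n f delta weights = compute_quorum_weight_alt n f delta weights := by
  intro n f delta w hpre
  obtain ⟨h1, h2⟩ := hpre
  simp only [compute_quorum_weight, compute_quorum_weight_alt]
  rw [pvQw_eq n f w h1 h2]
  set qw := (PySem.List.slice
      (PySem.List.sorted (PySem.List.slice w none (some (max n 0))) (fun x => x) false) none
      (some (((PySem.List.sorted (PySem.List.slice w none (some (max n 0)))
        (fun x => x) false).length : Int) - f))).sum with hqw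
  rw [PySem.List.foldl_append_singleton_eq_map (f := fun i => ([i] : List Int)), List.nil_append]
  rw [PySem.List.foldl_append_eq_flatMap
      (g := fun i => pvDfs n qw w [i] (PySem.List.pyGetD w i 0)), List.nil_append]
  set valid := pvCvqLoop n w qw [] ((PySem.List.pyRange 0 n 1).map (fun i => ([i] : List Int)))
    with hvalid
  set quorums := (PySem.List.pyRange 0 n 1).flatMap
    (fun i => pvDfs n qw w [i] (PySem.List.pyGetD w i 0)) with hquorums
  have hperm : valid.Perm quorums := by
    rw [hvalid, hquorums]
    refine (pvLoop_perm n qw w _ _ [] le_rfl).trans ?_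
    rw [List.nil_append, List.flatMap_map]
    refine List.Perm.of_eq (List.flatMap_congr (fun i _ => ?_))
    have : pvSumOf w [i] = PySem.List.pyGetD w i 0 := by
      simp [pvSumOf]
    rw [this]
  have hsortedQ : ∀ q ∈ quorums, q.Pairwise (· < ·) := by
    intro q hq
    rw [hquorums] at hq
    rcases List.mem_flatMap.1 hq with ⟨i, _, hq2⟩
    exact pvDfs_sorted n qw w (pvVal n [i]) [i] _ le_rfl (by simp) (by simp) q hq2
  have hsortedV : ∀ q ∈ valid, q.Pairwise (· < ·) := by
    intro q hq
    exact hsortedQ q (hperm.mem_iff.1 hq)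
  set P : List Int → List Int → Bool := fun q1 q2 =>
    decide (((PySem.Set.inter (PySem.Set.ofList q1) (PySem.Set.ofList q2)).length : Int) ≤ f)
    with hP
  have hPsymm : ∀ a b, P a b = P b a := by
    intro a b
    rw [hP]
    simp only
    rw [pvInterLen_comm]
  have hcheck :
      ((PySem.List.pyRange 0 (valid.length : Int) 1).any (fun i =>
        (PySem.List.pyRange (i + 1) (valid.length : Int) 1).any (fun j =>
          decide ((PySem.List.pyGetD valid i []).foldl
            (fun ov element => if (PySem.List.pyGetD valid j []).contains element
              then ov + 1 else ov) (0 : Int) < f + 1))))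
      = ((PySem.List.pyRange 0 (quorums.length : Int) 1).any (fun i =>
        (PySem.List.slice quorums (some (i + 1)) none).any (fun q2 =>
          decide (((PySem.Set.inter (PySem.Set.ofList (PySem.List.pyGetD quorums i []))
            (PySem.Set.ofList q2)).length : Int) ≤ f)))) := by
    rw [pvCheck_eq f valid hsortedV]
    rw [show ((PySem.List.pyRange 0 (valid.length : Int) 1).any (fun i =>
        (PySem.List.slice valid (some (i + 1)) none).any (fun q2 =>
          decide (((PySem.Set.inter (PySem.Set.ofList (PySem.List.pyGetD valid i []))
            (PySem.Set.ofList q2)).length : Int) ≤ f))))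
      = ((PySem.List.pyRange 0 (valid.length : Int) 1).any (fun i =>
        (PySem.List.slice valid (some (i + 1)) none).any (P (PySem.List.pyGetD valid i []))))
      from rfl]
    rw [pvAnyIdx P valid, pvAnyPairs_perm P hPsymm hperm, ← pvAnyIdx P quorums]
  rw [hcheck]

-- ===== VERDICT (by name: the statement is the Claim_ definition above) =====
theorem compute_quorum_weight_spec : Claim_equal_compute_quorum_weight := by
  intro n f delta weights _ hpre
  exact pv_main n f delta weights hpre
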